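-- pv_equiv track=rewrite | github.com/oskarsja/Python_101 | Python_101/108_dictionaries.py | clean_dict_values
-- ===== SOURCE A (Python) =====
-- def clean_dict_values(d, v_list):
--     delete = []
--     for key, value in d.items():
--         if value in v_list:
--             delete.append(key)
--
--     for i in delete:
--         del d[i]
--     return d
-- ===== SOURCE B (Python) =====
-- def clean_dict_values(d, v_list):
--     return {key: value for key, value in d.items() if value not in v_list}
-- ===== Notes on version B (the rewrite author's own statement) =====
-- stated objective: simpler
-- what changed: Instead of collecting doomed keys and then deleting them from d in a second mutating pass, B constructs and returns the complement directly: a single dict comprehension keeping the entries whose value is not in v_list (no mutation of d, no accumulator of keys).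
import Mathlib
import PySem

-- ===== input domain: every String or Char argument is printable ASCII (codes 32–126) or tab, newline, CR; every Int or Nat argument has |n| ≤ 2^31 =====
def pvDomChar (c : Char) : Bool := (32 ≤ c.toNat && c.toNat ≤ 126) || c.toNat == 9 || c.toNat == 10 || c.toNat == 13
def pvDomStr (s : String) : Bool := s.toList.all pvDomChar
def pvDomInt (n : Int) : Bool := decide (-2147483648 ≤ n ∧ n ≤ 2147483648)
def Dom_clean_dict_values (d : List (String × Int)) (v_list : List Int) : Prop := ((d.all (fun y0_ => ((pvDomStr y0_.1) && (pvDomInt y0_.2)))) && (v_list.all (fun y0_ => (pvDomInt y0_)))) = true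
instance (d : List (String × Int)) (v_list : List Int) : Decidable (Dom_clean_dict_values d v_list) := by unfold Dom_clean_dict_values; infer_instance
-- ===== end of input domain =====

-- B replaces A's delete-list-then-mutate scheme by directly building the complement with one
-- dict comprehension (simpler). Side effects differ: A mutates d in place and returns it, B
-- returns a NEW dict and leaves d untouched; the equivalence proved is about the returned value.

-- ===== PORT A =====
-- del d[k] on a dict with unique keys: remove the (single) entry with key k; exact on Pre_ (nodup keys)
def pyDelKey (dd : List (String × Int)) (k : String) : List (String × Int) :=
  dd.eraseP (fun q => q.1 == k)

def clean_dict_values (d : List (String × Int)) (v_list : List Int) : List (String × Int) :=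
  let delete := d.foldl (fun acc p => if p.2 ∈ v_list then acc ++ [p.1] else acc) []
  delete.foldl (fun dd k => pyDelKey dd k) d

-- ===== PORT B =====
-- the dict comprehension: keep the entries whose value is not in v_list, in order
def clean_dict_values_alt (d : List (String × Int)) (v_list : List Int) : List (String × Int) :=
  d.filter (fun p => !decide (p.2 ∈ v_list))

-- ===== PRECONDITION & SPEC =====
-- Pre_: the association list represents a Python dict, whose keys are necessarily distinct;
-- with a duplicated key the input denotes no dict at all.
def Pre_clean_dict_values (d : List (String × Int)) (v_list : List Int) : Prop :=
  (d.map Prod.fst).Nodup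
instance (d : List (String × Int)) (v_list : List Int) : Decidable (Pre_clean_dict_values d v_list) := by
  unfold Pre_clean_dict_values; infer_instance

def pvWitness_clean_dict_values : (List (String × Int)) × List Int :=
  ([("a", 1), ("b", 2), ("c", 3)], [2, 5])

def Spec_clean_dict_values (d : List (String × Int)) (v_list : List Int) (out : List (String × Int)) : Prop := out = clean_dict_values_alt d v_list
instance (d : List (String × Int)) (v_list : List Int) (out : List (String × Int)) : Decidable (Spec_clean_dict_values d v_list out) := by unfold Spec_clean_dict_values; infer_instance

-- ===== CLAIM (what is proved, stated in full; the proofs are below) =====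
def Claim_equal_clean_dict_values : Prop := ∀ (d : List (String × Int)) (v_list : List Int), Dom_clean_dict_values d v_list → Pre_clean_dict_values d v_list → Spec_clean_dict_values d v_list (clean_dict_values d v_list)

-- ===== LEMMAS AND PROOFS =====

-- A's first loop collects exactly the keys of the entries whose value is in v_list
theorem foldl_delete_eq (v_list : List Int) :
    ∀ (d : List (String × Int)) (acc : List String),
      d.foldl (fun acc p => if p.2 ∈ v_list then acc ++ [p.1] else acc) acc
        = acc ++ (d.filter (fun p => decide (p.2 ∈ v_list))).map Prod.fst := by
  intro d
  induction d with
  | nil => intro acc; simp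
  | cons p rest ih =>
    intro acc
    by_cases h : p.2 ∈ v_list <;> simp [List.foldl_cons, h, ih] <;> simp [List.append_assoc]

theorem eraseP_cons_ne (p : String × Int) (dd : List (String × Int)) (k : String) (h : p.1 ≠ k) :
    List.eraseP (fun q => q.1 == k) (p :: dd) = p :: List.eraseP (fun q => q.1 == k) dd := by
  simp [List.eraseP_cons, h]

theorem foldlA_skip (ks : List String) :
    ∀ (p : String × Int) (dd : List (String × Int)), p.1 ∉ ks →
      ks.foldl (fun dd k => pyDelKey dd k) (p :: dd)
        = p :: ks.foldl (fun dd k => pyDelKey dd k) dd := by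
  induction ks with
  | nil => intro p dd _; rfl
  | cons k ks ih =>
    intro p dd h
    have hne : p.1 ≠ k := by intro he; exact h (by simp [he])
    have hnot : p.1 ∉ ks := fun hm => h (by simp [hm])
    simp only [List.foldl_cons, pyDelKey, eraseP_cons_ne p dd k hne]
    exact ih p _ hnot

theorem keys_of_filter_subset (v_list : List Int) (d : List (String × Int)) (k : String)
    (h : k ∈ (d.filter (fun p => decide (p.2 ∈ v_list))).map Prod.fst) : k ∈ d.map Prod.fst := by
  simp only [List.mem_map] at h ⊢
  obtain ⟨p, hp, hk⟩ := h
  exact ⟨p, (List.mem_filter.mp hp).1, hk⟩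

-- A's result: erasing the collected keys = filtering out the matching entries (unique keys)
theorem A_eq_filter (v_list : List Int) :
    ∀ (d : List (String × Int)), (d.map Prod.fst).Nodup →
      ((d.filter (fun p => decide (p.2 ∈ v_list))).map Prod.fst).foldl (fun dd k => pyDelKey dd k) d
        = d.filter (fun p => !decide (p.2 ∈ v_list)) := by
  intro d
  induction d with
  | nil => intro _; rfl
  | cons p rest ih =>
    intro hnd
    simp only [List.map_cons, List.nodup_cons] at hnd
    obtain ⟨hp, hrest⟩ := hnd
    by_cases h : p.2 ∈ v_list
    · simp only [List.filter_cons, h, decide_true, if_true, List.map_cons, List.foldl_cons]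
      have : pyDelKey (p :: rest) p.1 = rest := by
        simp [pyDelKey, List.eraseP_cons]
      rw [this, ih hrest]
      simp
    · simp only [List.filter_cons, h, decide_false, if_false, Bool.false_eq_true]
      have hnotin : p.1 ∉ (rest.filter (fun q => decide (q.2 ∈ v_list))).map Prod.fst := by
        intro hm; exact hp (keys_of_filter_subset v_list rest p.1 hm)
      rw [foldlA_skip _ p rest hnotin, ih hrest]
      simp [h]

-- ===== VERDICT (by name: the statement is the Claim_ definition above) =====
theorem clean_dict_values_spec : Claim_equal_clean_dict_values := by
  intro d v_list _ hpre
  unfold Spec_clean_dict_values clean_dict_values clean_dict_values_alt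
  rw [foldl_delete_eq v_list d [], List.nil_append, A_eq_filter v_list d hpre]
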